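-- pv_equiv track=rewrite | github.com/yehoon17/programmers | 이진_변환_반복하기.py | solution
-- ===== SOURCE A (Python) =====
-- def solution(s):
--     zeros=s.count('0')
--     n=s.count('1')
--     if n==1:
--         if zeros>0:
--             return [1,zeros]
--         else:
--             return [0,0]
--     repeat=1
--     while(True):
--         temp=0
--         while(True):
--             if n%2==0:
--                 zeros+=1
--             else:
--                 temp+=1
--             n//=2
--             if n==0:
--                 break
--         n=temp
--         repeat+=1
--         if temp==1:
--             break
--     return[repeat,zeros]
-- ===== SOURCE B (Python) =====
-- def solution(s):
--     # Recursion on the popcount chain; zeros removed each step in closed form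
--     # as bit_length - bit_count, instead of A's nested bit-decomposition loops.
--     def go(n):
--         if n == 1:
--             return (0, 0)
--         p = n.bit_count()
--         t, z = go(p)
--         return (t + 1, z + n.bit_length() - p)
--     zeros = s.count('0')
--     n = s.count('1')
--     if n == 1 and zeros == 0:
--         return [0, 0]
--     t, z = go(n)
--     return [t + 1, zeros + z]
-- ===== Notes on version B (the rewrite author's own statement) =====
-- stated objective: simpler
-- what changed: B replaces A's nested while-loops with mutable counters by a single recursion on the popcount chain, computing each step's removed zeros in closed form as bit_length minus bit_count instead of A's bit-by-bit decomposition loop; Pre_ excludes strings containing no one-digit, on which A loops forever.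
import Mathlib
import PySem

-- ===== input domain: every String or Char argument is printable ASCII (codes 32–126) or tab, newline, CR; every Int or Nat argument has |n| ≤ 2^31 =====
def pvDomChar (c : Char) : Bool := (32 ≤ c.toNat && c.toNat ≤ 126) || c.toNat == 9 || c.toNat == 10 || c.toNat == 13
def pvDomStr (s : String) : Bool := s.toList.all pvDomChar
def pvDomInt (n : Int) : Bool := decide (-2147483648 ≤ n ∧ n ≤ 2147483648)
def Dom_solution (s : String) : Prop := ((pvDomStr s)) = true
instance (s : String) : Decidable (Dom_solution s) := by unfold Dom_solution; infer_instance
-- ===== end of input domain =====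

-- B replaces A's nested bit-decomposition while-loops by a single recursion on the popcount
-- chain with each step's removed zeros computed as bit_length - bit_count (simpler; same cost).
-- Pre_ excludes strings containing no one-digit at all, on which Python A loops forever.

-- ===== PORT A =====
-- inner `while True` loop of A: bit-decomposes n, counting zero bits into zeros and one bits
-- into temp; fuel n.toNat + 1 bounds its iterations (≤ bit length of n; one iteration for n = 0)
def solutionInner : Nat → Int → Int → Int → Int × Int
  | 0, _, zeros, temp => (zeros, temp)
  | fuel + 1, n, zeros, temp =>
    let zeros := if PySem.Int.mod n 2 == 0 then zeros + 1 else zeros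
    let temp := if PySem.Int.mod n 2 == 0 then temp else temp + 1
    let n := PySem.Int.floordiv n 2
    if n == 0 then (zeros, temp) else solutionInner fuel n zeros temp

-- outer `while True` loop of A; fuel n.toNat + 1 bounds its iterations (n strictly decreases)
def solutionOuter : Nat → Int → Int → Int → List Int
  | 0, _, _, _ => []
  | fuel + 1, n, zeros, repeat_ =>
    let p := solutionInner (n.toNat + 1) n zeros 0
    let zeros := p.1
    let temp := p.2
    let repeat_ := repeat_ + 1
    if temp == 1 then [repeat_, zeros] else solutionOuter fuel temp zeros repeat_

def solution (s : String) : List Int :=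
  let zeros : Int := (PySem.Str.count s "0" : Int)
  let n : Int := (PySem.Str.count s "1" : Int)
  if n == 1 then
    if zeros > 0 then [1, zeros] else [0, 0]
  else
    solutionOuter (n.toNat + 1) n zeros 1

-- ===== PORT B =====
-- n.bit_count(): number of one bits of n ≥ 0
def popCount : Nat → Nat
  | 0 => 0
  | n + 1 => popCount ((n + 1) / 2) + (n + 1) % 2
  decreasing_by exact Nat.div_lt_self (by omega) (by omega)

-- n.bit_length(): number of binary digits of n ≥ 0 (0 for n = 0)
def bitLength : Nat → Nat
  | 0 => 0
  | n + 1 => bitLength ((n + 1) / 2) + 1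
  decreasing_by exact Nat.div_lt_self (by omega) (by omega)

theorem popCount_le (n : Nat) : popCount n ≤ n := by
  induction n using Nat.strong_induction_on with
  | _ n ih =>
    match n with
    | 0 => simp [popCount]
    | m + 1 =>
      rw [popCount]
      have := ih ((m + 1) / 2) (Nat.div_lt_self (by omega) (by omega))
      omega

theorem popCount_lt (n : Nat) (h : 2 ≤ n) : popCount n < n := by
  match n, h with
  | m + 1, _ =>
    rw [popCount]
    have := popCount_le ((m + 1) / 2)
    omega

-- B's recursive helper go(n): transforms and zeros needed to reduce bin(n) to '1'
-- (the `if h :` guard only totalizes the n = 0 case, on which Python's go diverges)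
def solutionGo (n : Nat) : Nat × Nat :=
  if _h : n < 2 then (0, 0)
  else
    let p := popCount n
    let r := solutionGo p
    (r.1 + 1, r.2 + (bitLength n - p))
  decreasing_by exact popCount_lt n (by omega)

def solution_alt (s : String) : List Int :=
  let zeros := PySem.Str.count s "0"
  let n := PySem.Str.count s "1"
  if n == 1 && zeros == 0 then [0, 0]
  else
    let r := solutionGo n
    [(r.1 : Int) + 1, (zeros : Int) + (r.2 : Int)]

-- ===== PRECONDITION & SPEC =====
-- Pre_ excludes exactly the strings containing no one-digit: on those Python A never terminates
-- (its outer loop keeps n = 0 forever), and Python B's recursion never terminates either.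
def Pre_solution (s : String) : Prop := 1 ≤ PySem.Str.count s "1"
instance (s : String) : Decidable (Pre_solution s) := by unfold Pre_solution; infer_instance
def pvWitness_solution : String := "110010101001"

def Spec_solution (s : String) (out : List Int) : Prop := out = solution_alt s
instance (s : String) (out : List Int) : Decidable (Spec_solution s out) := by unfold Spec_solution; infer_instance

-- ===== CLAIM (what is proved, stated in full; the proofs are below) =====
def Claim_equal_solution : Prop := ∀ (s : String), Dom_solution s → Pre_solution s → Spec_solution s (solution s)

-- ===== LEMMAS AND PROOFS =====

theorem popCount_eq (n : Nat) (h : 1 ≤ n) : popCount n = popCount (n / 2) + n % 2 := by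
  match n, h with
  | m + 1, _ => rw [popCount]

theorem bitLength_eq (n : Nat) (h : 1 ≤ n) : bitLength n = bitLength (n / 2) + 1 := by
  match n, h with
  | m + 1, _ => rw [bitLength]

theorem popCount_pos (n : Nat) (h : 1 ≤ n) : 1 ≤ popCount n := by
  induction n using Nat.strong_induction_on with
  | _ n ih =>
    rw [popCount_eq n h]
    by_cases hm : n % 2 = 1
    · omega
    · have h2 : 1 ≤ n / 2 := by omega
      have := ih (n / 2) (Nat.div_lt_self (by omega) (by omega)) h2
      omega

theorem popCount_le_bitLength (n : Nat) : popCount n ≤ bitLength n := by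
  induction n using Nat.strong_induction_on with
  | _ n ih =>
    match n with
    | 0 => simp [popCount, bitLength]
    | m + 1 =>
      rw [popCount_eq (m + 1) (by omega), bitLength_eq (m + 1) (by omega)]
      have := ih ((m + 1) / 2) (Nat.div_lt_self (by omega) (by omega))
      omega

-- A's inner loop computes exactly popCount n one bits and bitLength n - popCount n zero bits
theorem solutionInner_eq : ∀ (fuel n : Nat), 1 ≤ n → n ≤ fuel → ∀ (z t : Int),
    solutionInner fuel (n : Int) z t
      = (z + (bitLength n : Int) - (popCount n : Int), t + (popCount n : Int)) := by
  intro fuel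
  induction fuel with
  | zero => intro n h1 h2; omega
  | succ fuel ih =>
    intro n h1 h2 z t
    have hmod : PySem.Int.mod (n : Int) 2 = ((n % 2 : Nat) : Int) := by
      rw [PySem.Int.mod_eq_emod_of_pos (by norm_num)]; omega
    have hdiv : PySem.Int.floordiv (n : Int) 2 = ((n / 2 : Nat) : Int) := by
      rw [PySem.Int.floordiv_eq_ediv_of_pos (by norm_num)]; omega
    rw [solutionInner]
    simp only [hmod, hdiv]
    rw [popCount_eq n h1, bitLength_eq n h1]
    by_cases h2' : n < 2
    · have hn : n = 1 := by omega
      subst hn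
      norm_num [popCount, bitLength]
    · have hne0 : ((((n / 2 : Nat) : Int)) == 0) = false := by
        simp only [beq_eq_false_iff_ne, ne_eq]
        have : 1 ≤ n / 2 := by omega
        omega
      have hfl : n / 2 ≤ fuel := by
        have := Nat.div_lt_self (show 0 < n by omega) (show 1 < 2 by omega)
        omega
      have hrec := ih (n / 2) (by omega) hfl
      have hble := popCount_le_bitLength (n / 2)
      by_cases hm : n % 2 = 0
      · simp only [hm, Nat.cast_zero, beq_self_eq_true, if_true, hne0, Bool.false_eq_true,
          if_false, hrec, Prod.mk.injEq]
        constructor <;> push_cast <;> omega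
      · have hm1 : n % 2 = 1 := by omega
        have h10 : (((1 : Nat) : Int) == 0) = false := by decide
        simp only [hm1, h10, Bool.false_eq_true, if_false, hne0, hrec, Prod.mk.injEq]
        constructor <;> push_cast <;> omega

-- lockstep: from any state with n ≥ 2, A's outer loop equals B's recursion result
theorem lockstep : ∀ (n : Nat), 2 ≤ n → ∀ (f : Nat) (z r : Int), n ≤ f →
    solutionOuter f (n : Int) z r = [r + ((solutionGo n).1 : Int), z + ((solutionGo n).2 : Int)] := by
  intro n
  induction n using Nat.strong_induction_on with
  | _ n ih =>
    intro hn f z r hf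
    obtain ⟨f', rfl⟩ : ∃ f', f = f' + 1 := ⟨f - 1, by omega⟩
    rw [solutionOuter]
    have htn : ((n : Int)).toNat = n := by simp
    rw [htn, solutionInner_eq (n + 1) n (by omega) (by omega) z 0]
    rw [solutionGo, dif_neg (by omega : ¬ n < 2)]
    have hpos := popCount_pos n (by omega)
    have hlt := popCount_lt n hn
    have hble := popCount_le_bitLength n
    set p := popCount n with hp
    by_cases hp1 : p = 1
    · rw [hp1]
      have ht : (((0 : Int) + ((1 : Nat) : Int)) == 1) = true := by decide
      rw [ht]
      have hgo1 : solutionGo 1 = (0, 0) := by rw [solutionGo]; norm_num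
      simp only [if_true, hgo1, List.cons.injEq, and_true]
      clear htn ht
      omega
    · have hp2 : 2 ≤ p := by omega
      have ht : (((0 : Int) + ((p : Nat) : Int)) == 1) = false := by
        simp only [beq_eq_false_iff_ne, ne_eq]
        omega
      rw [ht]
      simp only [Bool.false_eq_true, if_false, zero_add]
      rw [ih p (by omega) hp2 f' _ _ (by omega)]
      simp only [List.cons.injEq, and_true]
      clear htn ht
      omega

-- ===== VERDICT (by name: the statement is the Claim_ definition above) =====
theorem solution_spec : Claim_equal_solution := by
  intro s _ hpre
  unfold Pre_solution at hpre
  unfold Spec_solution solution solution_alt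
  set c0 : Nat := PySem.Str.count s "0" with hc0
  set c1 : Nat := PySem.Str.count s "1" with hc1
  clear_value c0 c1
  simp only
  by_cases h1 : c1 = 1
  · subst h1
    by_cases h0 : c0 = 0
    · subst h0
      norm_num
    · have hb : ((1 : Nat) == 1 && (c0 == 0)) = false := by simp [h0]
      rw [hb]
      have hgti : ((c0 : Int) > 0) := by omega
      have hgo1 : solutionGo 1 = (0, 0) := by rw [solutionGo]; norm_num
      simp only [Bool.false_eq_true, if_false, if_pos hgti, hgo1]
      norm_num
  · have h2 : 2 ≤ c1 := by omega
    have hne1 : (((c1 : Nat) : Int) == 1) = false := by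
      simp only [beq_eq_false_iff_ne, ne_eq]
      omega
    have hb : ((c1 == 1) && (c0 == 0)) = false := by simp [h1]
    rw [hne1, hb]
    simp only [Bool.false_eq_true, if_false]
    have htn : (((c1 : Nat) : Int)).toNat = c1 := by simp
    rw [htn, lockstep c1 h2 (c1 + 1) (c0 : Int) 1 (by omega)]
    simp only [List.cons.injEq, and_true]
    clear htn
    omega
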